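-- pv_equiv track=rewrite | github.com/Prong4107/scalpel | scalpel/src/main/resources/python/pyscalpel/http/mime.py | update_header_param
-- ===== SOURCE A (Python) =====
-- from typing import Sequence
--
-- def update_header_param(
--     params: Sequence[tuple[str, str | None]], key: str, value: str | None
-- ) -> list[tuple[str, str | None]]:
--     """Copy the provided params and update or add the matching value"""
--     new_params: list[tuple[str, str | None]] = list()
--     found: bool = False
--     for pkey, pvalue in params:
--         if not found and key == pkey:
--             pvalue = value
--             found = True
--         new_params.append((pkey, pvalue))
--
--     if not found:
--         new_params.append((key, value))
--
--     return new_params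
-- ===== SOURCE B (Python) =====
-- def update_header_param(params, key, value):
--     """Staged passes: project keys, locate, splice with slices (no flag, no rebuild)."""
--     params = list(params)
--     keys = [pkey for pkey, _ in params]
--     if key not in keys:
--         return params + [(key, value)]
--     i = keys.index(key)
--     return params[:i] + [(key, value)] + params[i + 1:]
-- ===== Notes on version B (the rewrite author's own statement) =====
-- stated objective: alternative
-- what changed: B works in staged passes over the whole list -- project the keys, test membership, take the first index, and splice the result together from slices -- instead of A's single loop that rebuilds the list element by element while threading a 'found' flag.
import Mathlib
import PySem

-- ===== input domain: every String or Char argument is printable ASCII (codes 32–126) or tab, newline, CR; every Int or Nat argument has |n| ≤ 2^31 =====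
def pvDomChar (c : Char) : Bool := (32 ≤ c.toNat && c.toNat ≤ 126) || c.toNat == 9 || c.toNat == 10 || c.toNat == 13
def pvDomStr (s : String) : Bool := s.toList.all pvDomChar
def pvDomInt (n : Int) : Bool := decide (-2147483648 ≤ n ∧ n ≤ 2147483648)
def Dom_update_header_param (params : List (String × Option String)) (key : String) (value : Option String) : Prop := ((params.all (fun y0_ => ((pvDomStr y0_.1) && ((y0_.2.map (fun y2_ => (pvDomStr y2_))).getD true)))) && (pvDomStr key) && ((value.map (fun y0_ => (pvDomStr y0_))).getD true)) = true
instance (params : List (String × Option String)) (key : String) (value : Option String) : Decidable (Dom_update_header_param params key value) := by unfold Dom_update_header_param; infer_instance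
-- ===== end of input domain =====

-- ===== PORT A =====
-- B replaces A's flag-threading rebuild loop by staged passes (project keys, locate, splice slices); return values proved equal.
def update_header_param (params : List (String × Option String)) (key : String) (value : Option String) : List (String × Option String) :=
  let st := params.foldl
    (fun (st : List (String × Option String) × Bool) p =>
      let pkey := p.1
      let pvalue := p.2
      if !st.2 && (key == pkey) then (st.1 ++ [(pkey, value)], true)
      else (st.1 ++ [(pkey, pvalue)], st.2))
    ([], false)
  if !st.2 then st.1 ++ [(key, value)] else st.1

-- ===== PORT B =====
def update_header_param_alt (params : List (String × Option String)) (key : String) (value : Option String) : List (String × Option String) :=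
  let keys := params.map (fun p => p.1)
  if !(keys.contains key) then params ++ [(key, value)]
  else
    -- keys.index(key): guarded by the membership test above, so index? is some; getD 0 is unreachable
    let i : Nat := (PySem.List.index? keys key).getD 0
    PySem.List.slice params none (some (i : Int)) ++ [(key, value)] ++ PySem.List.slice params (some ((i : Int) + 1)) none

-- ===== PRECONDITION & SPEC =====
def Spec_update_header_param (params : List (String × Option String)) (key : String) (value : Option String) (out : List (String × Option String)) : Prop := out = update_header_param_alt params key value
instance (params : List (String × Option String)) (key : String) (value : Option String) (out : List (String × Option String)) : Decidable (Spec_update_header_param params key value out) := by unfold Spec_update_header_param; infer_instance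

-- ===== CLAIM (what is proved, stated in full; the proofs are below) =====
def Claim_equal_update_header_param : Prop := ∀ (params : List (String × Option String)) (key : String) (value : Option String), Dom_update_header_param params key value → Spec_update_header_param params key value (update_header_param params key value)

-- ===== LEMMAS AND PROOFS =====
-- recursive characterisation shared by both ports
def pvRec (l : List (String × Option String)) (key : String) (value : Option String) : List (String × Option String) :=
  match l with
  | [] => [(key, value)]
  | p :: t => if p.1 == key then (key, value) :: t else p :: pvRec t key value

theorem alt_eq_pvRec (l : List (String × Option String)) (key : String) (value : Option String) :
    update_header_param_alt l key value = pvRec l key value := by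
  induction l with
  | nil => simp [update_header_param_alt, pvRec]
  | cons p t ih =>
    by_cases h : p.1 = key
    · subst h
      rw [pvRec, if_pos (by simp)]
      show update_header_param_alt (p :: t) p.1 value = _
      unfold update_header_param_alt
      rw [if_neg (by simp)]
      rw [show (p :: t).map (fun p => p.1) = p.1 :: t.map (fun p => p.1) from rfl]
      rw [PySem.List.index?_cons_self]
      simp only [Option.getD_some, Nat.cast_zero, zero_add]
      rw [show ((0 : Int)) = ((0 : Nat) : Int) from rfl, PySem.List.slice_to_natCast,
        PySem.List.slice_from_one]
      simp
    · have h2 : (p.1 == key) = false := beq_eq_false_iff_ne.mpr h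
      rw [pvRec, if_neg (by simp [h2]), ← ih]
      by_cases hm : key ∈ t.map (fun p => p.1)
      · obtain ⟨i, hi⟩ := Option.isSome_iff_exists.mp
          ((PySem.List.index?_isSome_iff _ _).mpr hm)
        unfold update_header_param_alt
        rw [if_neg (by simp [hm]), if_neg (by simp [hm])]
        rw [show (p :: t).map (fun p => p.1) = p.1 :: t.map (fun p => p.1) from rfl]
        rw [PySem.List.index?_cons_of_ne _ h, hi]
        simp only [Option.map_some, Option.getD_some]
        rw [show ((i + 1 : Nat) : Int) = (((i + 1 : Nat)) : Int) from rfl]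
        rw [PySem.List.slice_to_natCast]
        rw [show ((i : Nat) : Int) = (((i : Nat)) : Int) from rfl, PySem.List.slice_to_natCast]
        rw [show (((i + 1 : Nat) : Int) + 1) = (((i + 2 : Nat)) : Int) by push_cast; ring,
            PySem.List.slice_from_natCast]
        rw [show (((i : Nat) : Int) + 1) = (((i + 1 : Nat)) : Int) by push_cast; ring,
            PySem.List.slice_from_natCast]
        simp [List.take_succ_cons, List.drop_succ_cons]
      · unfold update_header_param_alt
        rw [if_pos (by simp [hm]; exact fun e => h e.symm), if_pos (by simp [hm])]
        simp

-- step function of A's fold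
def pvStepA (key : String) (value : Option String)
    (st : List (String × Option String) × Bool) (p : String × Option String) :
    List (String × Option String) × Bool :=
  if !st.2 && (key == p.1) then (st.1 ++ [(p.1, value)], true)
  else (st.1 ++ [(p.1, p.2)], st.2)

theorem pvStepA_eq (key : String) (value : Option String) (params : List (String × Option String))
    (acc : List (String × Option String)) (b : Bool) :
    params.foldl
      (fun (st : List (String × Option String) × Bool) p =>
        let pkey := p.1
        let pvalue := p.2
        if !st.2 && (key == pkey) then (st.1 ++ [(pkey, value)], true)
        else (st.1 ++ [(pkey, pvalue)], st.2)) (acc, b)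
    = params.foldl (pvStepA key value) (acc, b) := by
  rfl

theorem foldl_found (key : String) (value : Option String) (l : List (String × Option String))
    (acc : List (String × Option String)) :
    l.foldl (pvStepA key value) (acc, true) = (acc ++ l, true) := by
  induction l generalizing acc with
  | nil => simp
  | cons p t ih =>
    simp [pvStepA, List.foldl_cons, ih]

theorem main_lemma (key : String) (value : Option String) (l : List (String × Option String))
    (acc : List (String × Option String)) :
    (if !(l.foldl (pvStepA key value) (acc, false)).2
     then (l.foldl (pvStepA key value) (acc, false)).1 ++ [(key, value)]
     else (l.foldl (pvStepA key value) (acc, false)).1)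
    = acc ++ pvRec l key value := by
  induction l generalizing acc with
  | nil => simp [pvRec]
  | cons p t ih =>
    by_cases h : p.1 = key
    · subst h
      simp [pvStepA, pvRec, List.foldl_cons, foldl_found]
    · have h1 : (key == p.1) = false := beq_eq_false_iff_ne.mpr (fun e => h e.symm)
      have h2 : (p.1 == key) = false := beq_eq_false_iff_ne.mpr h
      have hstep : pvStepA key value (acc, false) p = (acc ++ [(p.1, p.2)], false) := by
        simp [pvStepA, h1]
      simp only [List.foldl_cons, hstep]
      rw [ih]
      simp [pvRec, h2]

-- ===== VERDICT (by name: the statement is the Claim_ definition above) =====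
theorem update_header_param_spec : Claim_equal_update_header_param := by
  intro params key value _
  unfold Spec_update_header_param update_header_param
  rw [pvStepA_eq, alt_eq_pvRec]
  simpa using main_lemma key value params []
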